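-- pv_equiv track=rewrite | github.com/YanivHajaj/Metastability-Containing-Hardware-Final-Project | Metastability_Final.py | generate_combinations_indexes
-- ===== SOURCE A (Python) =====
-- def generate_combinations_indexes(bitset, indices):
--     # Convert bitset to a list to modify specific indices
--     bitset_list = list(bitset)
--     combinations = []
--
--     # Recursive helper function to generate combinations
--     def generate_helper(current_bitset, idx):
--         if idx == len(indices):
--             combinations.append(''.join(current_bitset))
--             return
--         # Get the current index to modify
--         current_index = indices[idx]
--         # Replace at the current index with '0' and '1', then recurse
--         for bit in ['0', '1']:
--             current_bitset[current_index] = bit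
--             generate_helper(current_bitset, idx + 1)
--
--     # Start the recursive generation
--     generate_helper(bitset_list, 0)
--     return combinations
-- ===== SOURCE B (Python) =====
-- def generate_combinations_indexes(bitset, indices):
--     # Flat binary-counter enumeration: indices[0] is the most-significant bit.
--     k = len(indices)
--     result = []
--     for num in range(2 ** k):
--         bl = list(bitset)
--         for j, idx in enumerate(indices):
--             bl[idx] = str((num >> (k - 1 - j)) & 1)
--         result.append(''.join(bl))
--     return result
-- ===== Notes on version B (the rewrite author's own statement) =====
-- stated objective: alternative
-- what changed: Replaces the recursive branch-on-each-index generator mutating a shared list with a flat iterative binary counter: for each num in range(2**k) the bits of num (indices[0] = MSB) are written into a fresh copy of the bitset.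
import Mathlib
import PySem

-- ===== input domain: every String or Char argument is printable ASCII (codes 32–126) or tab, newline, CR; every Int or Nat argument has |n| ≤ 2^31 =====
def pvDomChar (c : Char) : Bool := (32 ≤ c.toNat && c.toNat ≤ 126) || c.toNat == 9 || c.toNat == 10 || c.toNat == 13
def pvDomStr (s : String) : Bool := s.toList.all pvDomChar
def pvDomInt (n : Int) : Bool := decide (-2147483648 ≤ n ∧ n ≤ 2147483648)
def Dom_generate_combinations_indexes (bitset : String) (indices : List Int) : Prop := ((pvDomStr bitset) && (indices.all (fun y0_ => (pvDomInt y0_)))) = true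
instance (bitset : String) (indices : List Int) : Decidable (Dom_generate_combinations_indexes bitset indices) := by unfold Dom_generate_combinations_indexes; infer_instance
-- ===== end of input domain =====

-- B replaces A's recursive index-by-index branching (over one shared mutable list) by a flat
-- binary-counter enumeration over range(2**k); objective: alternative (same cost).

-- ===== PORT A =====
-- A's helper mutates one shared list; the port threads that list state through explicitly:
-- the pair is (combinations produced, state of the shared list afterwards).
def pvAHelper (cur : List Char) (indices : List Int) : List String × List Char :=
  match indices with
  | [] => ([String.mk cur], cur)
  | i :: rest =>
    let c0 := PySem.List.pySetD cur i '0'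
    let r0 := pvAHelper c0 rest
    let c1 := PySem.List.pySetD r0.2 i '1'
    let r1 := pvAHelper c1 rest
    (r0.1 ++ r1.1, r1.2)

def generate_combinations_indexes (bitset : String) (indices : List Int) : List String :=
  (pvAHelper bitset.toList indices).1

-- ===== PORT B =====
def generate_combinations_indexes_alt (bitset : String) (indices : List Int) : List String :=
  let k := indices.length
  (List.range (2 ^ k)).foldl
    (fun result num =>
      let bl := (PySem.List.enumerate indices).foldl
        (fun bl ji =>
          PySem.List.pySetD bl ji.2
            (if (num >>> (k - 1 - ji.1.toNat)) &&& 1 == 1 then '1' else '0'))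
        bitset.toList
      result ++ [String.mk bl])
    []

-- ===== PRECONDITION & SPEC =====
-- Pre_ excludes exactly the inputs where A raises IndexError (an index outside [-len, len)); B raises there too.
def Pre_generate_combinations_indexes (bitset : String) (indices : List Int) : Prop :=
  ∀ i ∈ indices, -(bitset.toList.length : Int) ≤ i ∧ i < bitset.toList.length
instance (bitset : String) (indices : List Int) : Decidable (Pre_generate_combinations_indexes bitset indices) := by unfold Pre_generate_combinations_indexes; infer_instance
def pvWitness_generate_combinations_indexes : String × List Int := ("0110", [0, -1, 2])

def Spec_generate_combinations_indexes (bitset : String) (indices : List Int) (out : List String) : Prop := out = generate_combinations_indexes_alt bitset indices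
instance (bitset : String) (indices : List Int) (out : List String) : Decidable (Spec_generate_combinations_indexes bitset indices out) := by unfold Spec_generate_combinations_indexes; infer_instance

-- ===== CLAIM (what is proved, stated in full; the proofs are below) =====
def Claim_equal_generate_combinations_indexes : Prop := ∀ (bitset : String) (indices : List Int), Dom_generate_combinations_indexes bitset indices → Pre_generate_combinations_indexes bitset indices → Spec_generate_combinations_indexes bitset indices (generate_combinations_indexes bitset indices)

-- ===== LEMMAS AND PROOFS =====

-- the resolved (non-negative) position a Python index i refers to in a list of length L
def pvPos (L : Nat) (i : Int) : Nat := if i < 0 then ((L : Int) + i).toNat else i.toNat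

-- proof-side reference function: write num's bits (MSB first) at the positions of l
def pvFill (cur : List Char) (l : List Int) (num : Nat) : List Char :=
  match l with
  | [] => cur
  | i :: rest =>
    pvFill (PySem.List.pySetD cur i (if num / 2 ^ rest.length % 2 == 1 then '1' else '0')) rest num

lemma pySetD_eq_set (xs : List Char) (i : Int) (v : Char)
    (h1 : -(xs.length : Int) ≤ i) (h2 : i < xs.length) :
    PySem.List.pySetD xs i v = xs.set (pvPos xs.length i) v := by
  simp only [PySem.List.pySetD, PySem.List.pySet?, PySem.List.pyIdx?, pvPos]
  rcases lt_or_ge i 0 with hneg | hpos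
  · rw [if_neg (by omega), if_pos h1, if_pos hneg]
    simp only [Option.map_some, Option.getD_some]
    congr 1
    omega
  · rw [if_pos (by omega), if_pos h2, if_neg (by omega)]
    simp only [Option.map_some, Option.getD_some]

lemma pvPos_lt (L : Nat) (i : Int) (h1 : -(L : Int) ≤ i) (h2 : i < L) : pvPos L i < L := by
  unfold pvPos; split_ifs <;> omega

lemma length_pvFill (cur : List Char) (l : List Int) (num : Nat) :
    (pvFill cur l num).length = cur.length := by
  induction l generalizing cur with
  | nil => rfl
  | cons i rest ih => simp [pvFill, ih, PySem.List.length_pySetD]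

lemma getElem?_pvFill_not_mem (cur : List Char) (l : List Int) (num : Nat) (p : Nat)
    (hpre : ∀ i ∈ l, -(cur.length : Int) ≤ i ∧ i < cur.length)
    (hp : ∀ i ∈ l, pvPos cur.length i ≠ p) :
    (pvFill cur l num)[p]? = cur[p]? := by
  induction l generalizing cur with
  | nil => rfl
  | cons i rest ih =>
    have hin := hpre i (List.mem_cons_self ..)
    rw [pvFill, pySetD_eq_set _ _ _ hin.1 hin.2]
    rw [ih _ (by simpa using fun j hj => hpre j (List.mem_cons_of_mem _ hj))
          (by simpa using fun j hj => hp j (List.mem_cons_of_mem _ hj))]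
    rw [List.getElem?_set_ne (hp i (List.mem_cons_self ..))]

lemma pvFill_congr (l : List Int) (xs ys : List Char) (num : Nat)
    (hl : xs.length = ys.length)
    (hpre : ∀ i ∈ l, -(xs.length : Int) ≤ i ∧ i < xs.length)
    (h : ∀ p : Nat, (∀ i ∈ l, pvPos xs.length i ≠ p) → xs[p]? = ys[p]?) :
    pvFill xs l num = pvFill ys l num := by
  induction l generalizing xs ys with
  | nil => exact List.ext_getElem? (fun p => h p (by simp))
  | cons i rest ih =>
    have hin := hpre i (List.mem_cons_self ..)
    rw [pvFill, pvFill, pySetD_eq_set _ _ _ hin.1 hin.2,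
        pySetD_eq_set _ _ _ (hl ▸ hin.1) (hl ▸ hin.2), ← hl]
    apply ih
    · simp [hl]
    · intro j hj
      have := hpre j (List.mem_cons_of_mem _ hj)
      simpa using this
    · intro p hprest
      by_cases hpi : pvPos xs.length i = p
      · subst hpi
        rw [List.getElem?_set_self (by simpa using pvPos_lt _ _ hin.1 hin.2),
            List.getElem?_set_self (by have := pvPos_lt xs.length i hin.1 hin.2; omega)]
      · rw [List.getElem?_set_ne hpi, List.getElem?_set_ne hpi]
        refine h p ?_
        intro j hj
        rcases List.mem_cons.mp hj with rfl | hj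
        · exact hpi
        · simpa using hprest j hj

lemma pvFill_add_pow (cur : List Char) (l : List Int) (num q : Nat) :
    pvFill cur l (num + 2 ^ l.length * q) = pvFill cur l num := by
  induction l generalizing cur q with
  | nil => simp [pvFill]
  | cons i rest ih =>
    have key : num + 2 ^ (i :: rest).length * q = num + 2 ^ rest.length * (2 * q) := by
      simp [List.length_cons, pow_succ]; ring
    rw [pvFill, pvFill, key]
    rw [Nat.add_mul_div_left _ _ (Nat.two_pow_pos _), Nat.add_mul_mod_self_left]
    exact ih _ _

lemma pvAHelper_eq (cur : List Char) (l : List Int)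
    (hpre : ∀ i ∈ l, -(cur.length : Int) ≤ i ∧ i < cur.length) :
    pvAHelper cur l =
      ((List.range (2 ^ l.length)).map (fun n => String.mk (pvFill cur l n)),
       pvFill cur l (2 ^ l.length - 1)) := by
  induction l generalizing cur with
  | nil => simp [pvAHelper, pvFill]
  | cons i rest ih =>
    have hin := hpre i (List.mem_cons_self ..)
    have hrest : ∀ (c : List Char), c.length = cur.length →
        ∀ j ∈ rest, -(c.length : Int) ≤ j ∧ j < c.length := by
      intro c hc j hj; rw [hc]; exact hpre j (List.mem_cons_of_mem _ hj)
    have hlen0 : (PySem.List.pySetD cur i '0').length = cur.length := PySem.List.length_pySetD ..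
    have hlen1 : ∀ (c : List Char) (v : Char), c.length = cur.length →
        (PySem.List.pySetD c i v).length = cur.length := by
      intro c v hc; rw [PySem.List.length_pySetD, hc]
    set r := rest.length with hr
    set c0 := PySem.List.pySetD cur i '0' with hc0
    have ih0 := ih c0 (hrest c0 hlen0)
    set s0 := pvFill c0 rest (2 ^ r - 1) with hs0
    have hs0len : s0.length = cur.length := by rw [hs0, length_pvFill, hlen0]
    set c1 := PySem.List.pySetD s0 i '1' with hc1
    have hc1len : c1.length = cur.length := hlen1 _ _ hs0len
    have ih1 := ih c1 (hrest c1 hc1len)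
    -- the '1'-branch state c1 can be replaced by setting '1' directly on cur
    have hcong : ∀ n : Nat, pvFill c1 rest n = pvFill (PySem.List.pySetD cur i '1') rest n := by
      intro n
      apply pvFill_congr rest c1 (PySem.List.pySetD cur i '1') n
      · rw [hc1len, PySem.List.length_pySetD]
      · exact hrest c1 hc1len
      · intro p hprest
        have hprest' : ∀ j ∈ rest, pvPos cur.length j ≠ p := by
          intro j hj; have := hprest j hj; rwa [hc1len] at this
        rw [hc1, pySetD_eq_set _ _ _ (hs0len ▸ hin.1) (hs0len ▸ hin.2),
            pySetD_eq_set _ _ _ hin.1 hin.2]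
        have hps : pvPos s0.length i = pvPos cur.length i := by rw [hs0len]
        rw [hps]
        by_cases hpi : pvPos cur.length i = p
        · subst hpi
          rw [List.getElem?_set_self (by have := pvPos_lt cur.length i hin.1 hin.2; omega),
              List.getElem?_set_self (by have := pvPos_lt cur.length i hin.1 hin.2; omega)]
        · rw [List.getElem?_set_ne hpi, List.getElem?_set_ne hpi, hs0,
              getElem?_pvFill_not_mem _ _ _ _ (hrest c0 hlen0)
                (by intro j hj; rw [hlen0]; exact hprest' j hj),
              hc0, pySetD_eq_set _ _ _ hin.1 hin.2, List.getElem?_set_ne hpi]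
    -- bit values of the two halves
    have hbit0 : ∀ n : Nat, n < 2 ^ r → n / 2 ^ r % 2 = 0 := by
      intro n hn; rw [Nat.div_eq_of_lt hn]
    have hbit1 : ∀ n : Nat, n < 2 ^ r → (2 ^ r + n) / 2 ^ r % 2 = 1 := by
      intro n hn
      rw [Nat.add_comm, Nat.add_div_right _ (Nat.two_pow_pos _),
          Nat.div_eq_of_lt hn]
    have hsplit : (2 : Nat) ^ (i :: rest).length = 2 ^ r + 2 ^ r := by
      simp [List.length_cons, pow_succ]; ring
    have hfill0 : ∀ n : Nat, n < 2 ^ r →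
        pvFill cur (i :: rest) n = pvFill c0 rest n := by
      intro n hn; rw [pvFill, hbit0 n hn]; rfl
    have hfill1 : ∀ n : Nat, n < 2 ^ r →
        pvFill cur (i :: rest) (2 ^ r + n) = pvFill c1 rest n := by
      intro n hn
      rw [pvFill, hbit1 n hn]
      show pvFill (PySem.List.pySetD cur i '1') rest (2 ^ r + n) = _
      rw [Nat.add_comm, show 2 ^ r = 2 ^ r * 1 by ring, pvFill_add_pow, hcong n]
    have hlast : pvFill cur (i :: rest) (2 ^ (i :: rest).length - 1) = pvFill c1 rest (2 ^ r - 1) := by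
      have : 2 ^ (i :: rest).length - 1 = 2 ^ r + (2 ^ r - 1) := by
        rw [hsplit]; have := Nat.two_pow_pos r; omega
      rw [this, hfill1 _ (by have := Nat.two_pow_pos r; omega)]
    rw [show pvAHelper cur (i :: rest) =
        ((pvAHelper c0 rest).1 ++ (pvAHelper (PySem.List.pySetD (pvAHelper c0 rest).2 i '1') rest).1,
         (pvAHelper (PySem.List.pySetD (pvAHelper c0 rest).2 i '1') rest).2) from rfl]
    rw [ih0]
    simp only [← hc1]
    rw [ih1]
    refine Prod.ext ?_ ?_
    · show _ ++ _ = (List.range (2 ^ (i :: rest).length)).map _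
      rw [hsplit, List.range_add, List.map_append, List.map_map]
      congr 1
      · exact List.map_congr_left (fun n hn => by
          rw [hfill0 n (List.mem_range.mp hn)])
      · exact (List.map_congr_left (fun n hn => by
          simp only [Function.comp]
          rw [hfill1 n (List.mem_range.mp hn)])).symm
    · show pvFill c1 rest (2 ^ r - 1) = _
      rw [hlast]

lemma foldl_append_singleton {α β : Type} (f : α → β) (l : List α) (acc : List β) :
    l.foldl (fun res x => res ++ [f x]) acc = acc ++ l.map f := by
  induction l generalizing acc with
  | nil => simp
  | cons x xs ih => simp [ih]

lemma foldl_enumerate_eq_pvFill (l : List Int) (s : Int) (cur : List Char) (num k : Nat)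
    (hs : 0 ≤ s) (hk : s.toNat + l.length = k) :
    (PySem.List.enumerate l s).foldl
      (fun bl ji =>
        PySem.List.pySetD bl ji.2
          (if (num >>> (k - 1 - ji.1.toNat)) &&& 1 == 1 then '1' else '0'))
      cur = pvFill cur l num := by
  induction l generalizing s cur with
  | nil => rfl
  | cons i rest ih =>
    rw [PySem.List.enumerate_cons, List.foldl_cons, pvFill]
    have h1 : k - 1 - s.toNat = rest.length := by
      simp only [List.length_cons] at hk; omega
    have h2 : num >>> rest.length &&& 1 = num / 2 ^ rest.length % 2 := by
      rw [Nat.shiftRight_eq_div_pow, Nat.and_one_is_mod]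
    rw [h1, h2]
    exact ih (s + 1) _ (by omega) (by simp only [List.length_cons] at hk; omega)

-- ===== VERDICT (by name: the statement is the Claim_ definition above) =====
theorem generate_combinations_indexes_spec : Claim_equal_generate_combinations_indexes := by
  intro bitset indices _ hpre
  unfold Spec_generate_combinations_indexes
  unfold generate_combinations_indexes generate_combinations_indexes_alt
  rw [pvAHelper_eq _ _ hpre, foldl_append_singleton]
  simp only [List.nil_append]
  exact List.map_congr_left (fun n _ => by
    rw [foldl_enumerate_eq_pvFill indices 0 _ n indices.length (by norm_num) (by simp)])
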